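-- pv_equiv track=rewrite | github.com/Chekinm/Code-wars | Problems-from-web/differential_generator.py | delta_with_while
-- ===== SOURCE A (Python) =====
-- from collections import deque
--
-- def delta_with_while(values, n):
--
--     values_iter = iter(values)
--     deq = deque()
--     flag = True
--     while flag:
--         try:
--             while len(deq) < n + 1:
--                 deq.append(next(values_iter))
--                 i = len(deq) - 2
--                 while i >= 0:
--                     deq[i] = deq[i+1] - deq[i]
--                     i -= 1
--             yield deq.popleft()
--         except StopIteration:
--             flag = False
-- ===== SOURCE B (Python) =====
-- def delta_with_while(values, n):
--     it = iter(values)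
--     window = []
--     while True:
--         while len(window) < n + 1:
--             try:
--                 window.append(next(it))
--             except StopIteration:
--                 return
--         d = window
--         for _ in range(n):
--             d = [d[i + 1] - d[i] for i in range(len(d) - 1)]
--         yield d[0]
--         window.pop(0)
-- ===== Notes on version B (the rewrite author's own statement) =====
-- stated objective: alternative
-- what changed: A streams values through a deque that incrementally maintains a staircase of partial differences via an in-place cascading update per element; B keeps a sliding window of the last n+1 raw values and recomputes the nth difference of the window with n list-wide differencing passes per emitted value.
import Mathlib
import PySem

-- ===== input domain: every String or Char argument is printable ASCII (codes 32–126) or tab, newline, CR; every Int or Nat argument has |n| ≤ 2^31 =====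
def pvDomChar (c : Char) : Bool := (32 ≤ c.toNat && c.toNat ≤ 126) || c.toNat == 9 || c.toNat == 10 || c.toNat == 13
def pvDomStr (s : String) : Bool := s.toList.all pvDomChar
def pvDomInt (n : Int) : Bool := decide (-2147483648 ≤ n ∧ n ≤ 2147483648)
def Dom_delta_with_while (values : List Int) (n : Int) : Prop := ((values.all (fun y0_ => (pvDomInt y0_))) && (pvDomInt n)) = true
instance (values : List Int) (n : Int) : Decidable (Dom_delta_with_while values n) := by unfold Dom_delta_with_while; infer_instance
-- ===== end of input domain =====

-- B slides a window of the last n+1 RAW values and recomputes the nth difference of the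
-- window per emission (alternative: no incrementally maintained deque staircase).

-- ===== PORT A =====
-- the inner 'while i >= 0: deq[i] = deq[i+1] - deq[i]' cascade after appending a value,
-- written as the structural recursion from the low index upward (deq[i+1] is already updated)
def pvCascade : List Int → List Int
  | [] => []
  | [v] => [v]
  | a :: rest => ((pvCascade rest).headD 0 - a) :: pvCascade rest

-- A's generator: fold over the incoming values; state = (deque, yielded outputs so far).
-- Each next() appends and cascades; when the deque reaches length n+1 it yields popleft.
def delta_with_while (values : List Int) (n : Int) : List Int :=
  if n < 0 then []  -- Python raises IndexError here (popleft from empty deque); outside Pre_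
  else
    (values.foldl
      (fun (st : List Int × List Int) v =>
        let d := pvCascade (st.1 ++ [v])
        if d.length = n.toNat + 1 then (d.tail, st.2 ++ [d.headD 0]) else (d, st.2))
      ([], [])).2

-- ===== PORT B =====
-- one pass of 'd = [d[i+1]-d[i] for i in range(len(d)-1)]'
def pvDiffOnce : List Int → List Int
  | a :: b :: t => (b - a) :: pvDiffOnce (b :: t)
  | _ => []

-- 'for _ in range(n): d = [d[i+1]-d[i] for i in range(len(d)-1)]'
def pvDiffN : Nat → List Int → List Int
  | 0, d => d
  | m + 1, d => pvDiffN m (pvDiffOnce d)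

-- 'while len(window) < n+1: window.append(next(it))'; none = StopIteration ends the generator
def pvFill (k : Nat) : List Int → List Int → Option (List Int × List Int)
  | it, w =>
    if w.length < k then
      match it with
      | [] => none
      | v :: it' => pvFill k it' (w ++ [v])
    else some (it, w)
  termination_by it _ => it.length

-- the outer 'while True' loop: fill the window, emit the window's nth difference, pop the
-- oldest raw value; fuel = values.length + 1 bounds the iterations (totality guard only)
def pvEmit (k : Nat) : Nat → List Int → List Int → List Int
  | 0, _, _ => []
  | fuel + 1, it, w =>
    match pvFill k it w with
    | none => []
    | some (it', w') => (pvDiffN (k - 1) w').headD 0 :: pvEmit k fuel it' w'.tail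

def delta_with_while_alt (values : List Int) (n : Int) : List Int :=
  if n < 0 then []  -- Python raises IndexError here (d[0] on the empty list); outside Pre_
  else pvEmit (n.toNat + 1) (values.length + 1) values []

-- ===== PRECONDITION & SPEC =====
-- Pre_ excludes n < 0, on which both Pythons raise IndexError.
def Pre_delta_with_while (values : List Int) (n : Int) : Prop := 0 ≤ n
instance (values : List Int) (n : Int) : Decidable (Pre_delta_with_while values n) := by
  unfold Pre_delta_with_while; infer_instance
def pvWitness_delta_with_while : List Int × Int := ([1, 3, 6, 10], 2)

def Spec_delta_with_while (values : List Int) (n : Int) (out : List Int) : Prop := out = delta_with_while_alt values n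
instance (values : List Int) (n : Int) (out : List Int) : Decidable (Spec_delta_with_while values n out) := by unfold Spec_delta_with_while; infer_instance

-- ===== CLAIM (what is proved, stated in full; the proofs are below) =====
def Claim_equal_delta_with_while : Prop := ∀ (values : List Int) (n : Int), Dom_delta_with_while values n → Pre_delta_with_while values n → Spec_delta_with_while values n (delta_with_while values n)

-- ===== LEMMAS AND PROOFS =====

-- the "staircase" A's deque holds: entry i is the (len-1-i)-th difference of the raw suffix
def pvStair : List Int → List Int
  | [] => []
  | a :: rest => (pvDiffN rest.length (a :: rest)).headD 0 :: pvStair rest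

-- the common form both sides are reduced to: the windowed nth differences
def pvWin (k : Nat) (l : List Int) : List Int :=
  (List.range (l.length + 1 - k)).map
    (fun j => (pvDiffN (k - 1) ((l.drop j).take k)).headD 0)

theorem pvDiffOnce_length (w : List Int) : (pvDiffOnce w).length = w.length - 1 := by
  induction w with
  | nil => simp [pvDiffOnce]
  | cons a t ih =>
    cases t with
    | nil => simp [pvDiffOnce]
    | cons b t' => simp [pvDiffOnce] at ih ⊢; omega

theorem pvDiffN_length (m : Nat) (w : List Int) : (pvDiffN m w).length = w.length - m := by
  induction m generalizing w with
  | zero => simp [pvDiffN]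
  | succ m ih => simp [pvDiffN, ih, pvDiffOnce_length]; omega

theorem pvDiffN_succ (m : Nat) (w : List Int) :
    pvDiffN (m + 1) w = pvDiffOnce (pvDiffN m w) := by
  induction m generalizing w with
  | zero => simp [pvDiffN]
  | succ m ih => simp only [pvDiffN]; exact ih (pvDiffOnce w)

theorem pvDiffOnce_tail (w : List Int) : pvDiffOnce w.tail = (pvDiffOnce w).tail := by
  match w with
  | [] => rfl
  | [a] => rfl
  | a :: b :: t => rfl

theorem pvDiffN_tail (m : Nat) (w : List Int) :
    pvDiffN m w.tail = (pvDiffN m w).tail := by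
  induction m generalizing w with
  | zero => rfl
  | succ m ih => simp only [pvDiffN, pvDiffOnce_tail, ih (pvDiffOnce w)]

theorem pvDiffOnce_dropLast (w : List Int) : pvDiffOnce w.dropLast = (pvDiffOnce w).dropLast := by
  match w with
  | [] => rfl
  | [a] => rfl
  | [a, b] => rfl
  | a :: b :: c :: t =>
    have ih := pvDiffOnce_dropLast (b :: c :: t)
    simp only [pvDiffOnce, List.dropLast_cons₂] at ih ⊢
    rw [ih]

theorem pvDiffN_dropLast (m : Nat) (w : List Int) :
    pvDiffN m w.dropLast = (pvDiffN m w).dropLast := by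
  induction m generalizing w with
  | zero => rfl
  | succ m ih => simp only [pvDiffN, pvDiffOnce_dropLast, ih (pvDiffOnce w)]

-- key numerical fact: head of the (m+1)-st difference of a length-(m+2) window
theorem pvDiffN_head_step (m : Nat) (w : List Int) (hw : w.length = m + 2) :
    (pvDiffN (m + 1) w).headD 0
      = (pvDiffN m w.tail).headD 0 - (pvDiffN m w.dropLast).headD 0 := by
  have hlen : (pvDiffN m w).length = 2 := by rw [pvDiffN_length, hw]; omega
  rw [pvDiffN_succ, pvDiffN_tail, pvDiffN_dropLast]
  match hd : pvDiffN m w with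
  | [x, y] => simp [pvDiffOnce]
  | [] => rw [hd] at hlen; simp at hlen
  | [x] => rw [hd] at hlen; simp at hlen
  | x :: y :: z :: t => rw [hd] at hlen; simp at hlen

theorem pvStair_length (w : List Int) : (pvStair w).length = w.length := by
  induction w with
  | nil => rfl
  | cons a t ih => simp [pvStair, ih]

theorem pvStair_headD (w : List Int) (h : w ≠ []) :
    (pvStair w).headD 0 = (pvDiffN (w.length - 1) w).headD 0 := by
  cases w with
  | nil => exact absurd rfl h
  | cons a t => simp [pvStair]

theorem pvStair_tail (w : List Int) : (pvStair w).tail = pvStair w.tail := by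
  cases w with
  | nil => rfl
  | cons a t => simp [pvStair]

theorem pvCascade_cons (x : Int) (l : List Int) (h : l ≠ []) :
    pvCascade (x :: l) = ((pvCascade l).headD 0 - x) :: pvCascade l := by
  cases l with
  | nil => exact absurd rfl h
  | cons b t => rfl

-- appending one raw value and cascading extends the staircase
theorem pvCascade_stair (w : List Int) (v : Int) :
    pvCascade (pvStair w ++ [v]) = pvStair (w ++ [v]) := by
  induction w with
  | nil => simp [pvStair, pvCascade, pvDiffN]
  | cons a r ih =>
    have hne : pvStair r ++ [v] ≠ [] := by simp
    simp only [pvStair, List.cons_append]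
    rw [pvCascade_cons _ _ hne, ih]
    have hne2 : r ++ [v] ≠ [] := by simp
    rw [pvStair_headD _ hne2]
    have hdl : (a :: (r ++ [v])).dropLast = a :: r := by
      rw [show a :: (r ++ [v]) = (a :: r) ++ [v] by simp, List.dropLast_concat]
    have hstep := pvDiffN_head_step r.length (a :: (r ++ [v])) (by simp)
    rw [List.tail_cons, hdl] at hstep
    simp only [List.length_append, List.length_cons, List.length_nil]
    rw [show r.length + 1 - 1 = r.length by omega, hstep]

-- A's fold invariant: starting from a staircase over raw window w (shorter than k),
-- the fold emits exactly the windowed (k-1)-th differences of w ++ vs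
theorem pvMain (k : Nat) (hk : 0 < k) (vs : List Int) :
    ∀ (w out : List Int), w.length < k →
    (vs.foldl
      (fun (st : List Int × List Int) v =>
        let d := pvCascade (st.1 ++ [v])
        if d.length = k then (d.tail, st.2 ++ [d.headD 0]) else (d, st.2))
      (pvStair w, out)).2
    = out ++ (List.range (w.length + vs.length + 1 - k)).map
        (fun j => (pvDiffN (k - 1) (((w ++ vs).drop j).take k)).headD 0) := by
  induction vs with
  | nil =>
    intro w out hw
    simp only [List.foldl_nil, List.length_nil, Nat.add_zero]
    rw [show w.length + 0 + 1 - k = 0 by omega]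
    simp
  | cons v rest ih =>
    intro w out hw
    simp only [List.foldl_cons]
    rw [pvCascade_stair w v, pvStair_length]
    by_cases hfull : (w ++ [v]).length = k
    · rw [if_pos hfull]
      rw [pvStair_tail, pvStair_headD _ (by simp)]
      have hwlen : w.length + 1 = k := by simpa using hfull
      have htl : ((w ++ [v]).tail).length < k := by
        rw [List.length_tail]; omega
      rw [ih ((w ++ [v]).tail) _ htl]
      have hlen2 : ((w ++ [v]).tail).length = k - 1 := by
        rw [List.length_tail]; simp; omega
      rw [hlen2, show k - 1 + rest.length + 1 - k = rest.length by omega]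
      rw [show w.length + (v :: rest).length + 1 - k = rest.length + 1 by simp; omega]
      rw [List.range_succ_eq_map, List.map_cons, List.map_map]
      rw [List.append_assoc, List.singleton_append]
      congr 1
      rw [List.drop_zero, show (w ++ v :: rest) = (w ++ [v]) ++ rest by simp,
          List.take_left' hfull, hfull]
      congr 1
      refine List.map_congr_left (fun j hj => ?_)
      have hdrop : ((w ++ [v]) ++ rest).drop (j + 1) = ((w ++ [v]).tail ++ rest).drop j := by
        have h1 : ((w ++ [v]) ++ rest).drop (j + 1) = (((w ++ [v]) ++ rest).drop 1).drop j := by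
          rw [List.drop_drop]; congr 1; omega
        rw [h1]
        congr 1
        rw [List.drop_one]
        cases w <;> simp
      simp only [Function.comp_apply, Nat.succ_eq_add_one, hdrop]
    · rw [if_neg hfull]
      have hlt : (w ++ [v]).length < k := by
        simp only [List.length_append, List.length_cons, List.length_nil] at hfull ⊢
        omega
      rw [ih (w ++ [v]) out hlt]
      simp only [List.append_assoc, List.singleton_append, List.length_append,
        List.length_cons, List.length_nil]
      rw [show w.length + (0 + 1) + rest.length + 1 - k = w.length + (rest.length + 1) + 1 - k by omega]

-- pvFill characterised: it tops the window up to the first k of w ++ it, or runs out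
theorem pvFill_spec (k : Nat) : ∀ (it w : List Int), w.length ≤ k →
    pvFill k it w =
      if k ≤ w.length + it.length then some ((w ++ it).drop k, (w ++ it).take k)
      else none := by
  intro it
  induction it with
  | nil =>
    intro w hw
    unfold pvFill
    by_cases h : w.length < k
    · rw [if_pos h, if_neg (by simpa using by omega)]
    · have hk : w.length = k := by omega
      rw [if_neg h, if_pos (by simpa using by omega)]
      simp [List.drop_of_length_le (le_of_eq hk), List.take_of_length_le (le_of_eq hk)]
  | cons v it' ih =>
    intro w hw
    unfold pvFill
    by_cases h : w.length < k
    · rw [if_pos h]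
      show pvFill k it' (w ++ [v]) = _
      rw [ih (w ++ [v]) (by simp; omega)]
      simp only [List.length_append, List.length_cons, List.length_nil, List.append_assoc,
        List.singleton_append]
      rw [show w.length + 1 + it'.length = w.length + (it'.length + 1) by omega]
      rfl
    · have hk : w.length = k := by omega
      rw [if_neg h, if_pos (by simp; omega)]
      have h1 : (w ++ v :: it').take k = w := by
        rw [List.take_append_of_le_length (le_of_eq hk.symm),
          List.take_of_length_le (le_of_eq hk)]
      have h2 : (w ++ v :: it').drop k = v :: it' := by
        rw [← hk, List.drop_left]
      simp [h1, h2]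

-- B's loop invariant: with a window shorter than k and enough fuel, pvEmit produces
-- the windowed (k-1)-th differences of w ++ it
theorem pvEmit_spec (k : Nat) : ∀ (fuel : Nat) (it w : List Int),
    w.length < k → it.length < fuel →
    pvEmit k fuel it w = pvWin k (w ++ it) := by
  intro fuel
  induction fuel with
  | zero => intro it w _ h; omega
  | succ fuel ih =>
    intro it w hw hfuel
    unfold pvEmit
    rw [pvFill_spec k it w (le_of_lt hw)]
    by_cases hlen : k ≤ w.length + it.length
    · rw [if_pos hlen]
      simp only
      set l := w ++ it with hl
      have hk : 0 < k := by omega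
      have hll : k ≤ l.length := by simp [hl]; omega
      have htail : (l.take k).tail ++ l.drop k = l.tail := by
        have h1 : (l.take k).tail = l.tail.take (k - 1) := by
          rw [← List.drop_one, ← List.drop_one, List.drop_take]
        have h2 : l.drop k = l.tail.drop (k - 1) := by
          rw [← List.drop_one, List.drop_drop]
          congr 1; omega
        rw [h1, h2, List.take_append_drop]
      have hrec := ih (l.drop k) ((l.take k).tail)
        (by rw [List.length_tail, List.length_take]; omega)
        (by rw [List.length_drop]; simp [hl] at hll ⊢; omega)
      rw [hrec, htail]
      -- unfold one step of pvWin
      unfold pvWin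
      have hlt : l.tail.length + 1 - k + 1 = l.length + 1 - k := by
        rw [List.length_tail]; omega
      rw [← hlt, List.range_succ_eq_map, List.map_cons, List.map_map]
      congr 1
      refine List.map_congr_left (fun j hj => ?_)
      have hdj : l.drop (j + 1) = l.tail.drop j := by
        rw [← List.drop_one, List.drop_drop]; congr 1; omega
      simp only [Function.comp_apply, Nat.succ_eq_add_one, hdj]
    · rw [if_neg hlen]
      unfold pvWin
      rw [show (w ++ it).length + 1 - k = 0 by simp; omega]
      simp

theorem delta_eq (values : List Int) (n : Int) (hn : 0 ≤ n) :
    delta_with_while values n = delta_with_while_alt values n := by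
  unfold delta_with_while delta_with_while_alt
  rw [if_neg (by omega), if_neg (by omega)]
  have hA := pvMain (n.toNat + 1) (by omega) values [] [] (by simp)
  simp only [pvStair, List.nil_append, List.length_nil, Nat.zero_add] at hA
  have hB := pvEmit_spec (n.toNat + 1) (values.length + 1) values []
    (by simp) (by omega)
  rw [hA, hB]
  unfold pvWin
  simp

-- ===== VERDICT (by name: the statement is the Claim_ definition above) =====
theorem delta_with_while_spec : Claim_equal_delta_with_while := by
  intro values n _ hpre
  unfold Spec_delta_with_while
  exact delta_eq values n hpre
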